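-- pv_equiv track=rewrite | github.com/AlexTyl/Python-learning | Taskes/Task3.05.py | sum_elements_columns_multiples
-- ===== SOURCE A (Python) =====
-- def sum_elements_columns_multiples(matrix, p):
--     sum = 0
--     cols_multiples_array = []
--     for j in range(len(matrix[0])):
--         col_multiples = True
--         for i in range(len(matrix)):
--             if matrix[i][j] % p != 0:
--                 col_multiples = False
--                 break
--         if col_multiples:
--             cols_multiples_array.append(j)
--     for j in cols_multiples_array:
--         for i in range(len(matrix)):
--             sum += matrix[i][j]
--     return sum
-- ===== SOURCE B (Python) =====
-- def sum_elements_columns_multiples(matrix, p):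
--     n = len(matrix[0])
--     sums = [0] * n
--     ok = [True] * n
--     for row in matrix:
--         for j in range(n):
--             x = row[j]
--             sums[j] += x
--             if x % p != 0:
--                 ok[j] = False
--     return sum(s for s, good in zip(sums, ok) if good)
-- ===== Notes on version B (the rewrite author's own statement) =====
-- stated objective: alternative
-- what changed: Replaced A's column-major two-phase scheme (per column, scan all rows with an early break to collect qualifying indices, then re-loop over rows to sum them) by one row-major streaming pass that maintains per-column running sums and divisibility flags, combined at the end; Pre_ excludes the empty matrix and p=0 (both raise) and matrices with a row shorter than the first, on which B raises IndexError while A's early break sometimes lets it return.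
-- outside the precondition, e.g. on sum_elements_columns_multiples([[2, 1], [4]], 2): A returns 6, B raises IndexError
import Mathlib
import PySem

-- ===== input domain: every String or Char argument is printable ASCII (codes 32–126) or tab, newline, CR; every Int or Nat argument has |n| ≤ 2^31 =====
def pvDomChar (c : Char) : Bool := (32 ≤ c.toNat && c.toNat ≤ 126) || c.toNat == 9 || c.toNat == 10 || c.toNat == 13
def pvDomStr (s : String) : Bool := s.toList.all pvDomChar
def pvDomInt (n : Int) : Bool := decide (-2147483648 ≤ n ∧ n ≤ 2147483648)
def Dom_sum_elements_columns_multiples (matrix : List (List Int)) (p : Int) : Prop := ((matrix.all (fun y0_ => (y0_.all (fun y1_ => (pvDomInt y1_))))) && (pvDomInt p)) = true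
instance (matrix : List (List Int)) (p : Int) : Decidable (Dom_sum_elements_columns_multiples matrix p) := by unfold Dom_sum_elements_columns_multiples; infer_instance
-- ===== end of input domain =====

-- B replaces A's column-major two-phase scheme (collect qualifying column indices, then
-- re-loop over rows to sum them) with one row-major streaming pass maintaining per-column
-- running sums and divisibility flags: an alternative traversal of the same cost.

-- ===== PORT A =====
-- inner 'for i in range(len(matrix))' loop with its break, carried as recursion over the index list
def pvA_colCheck (matrix : List (List Int)) (p : Int) (j : Nat) : List Nat → Bool
  | [] => true
  | i :: rest =>
      if PySem.Int.mod ((matrix.getD i []).getD j 0) p ≠ 0 then false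
      else pvA_colCheck matrix p j rest

def sum_elements_columns_multiples (matrix : List (List Int)) (p : Int) : Int :=
  let cols_multiples_array : List Nat :=
    (List.range (matrix.headI.length)).foldl
      (fun acc j => if pvA_colCheck matrix p j (List.range matrix.length) then acc ++ [j] else acc) []
  cols_multiples_array.foldl
    (fun s j => (List.range matrix.length).foldl (fun s' i => s' + (matrix.getD i []).getD j 0) s) 0

-- ===== PORT B =====
-- body of B's inner 'for j in range(n)' loop: update running sum and flag at column j
def pvB_upd (p : Int) (row : List Int) (st : List Int × List Bool) (j : Nat) : List Int × List Bool :=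
  let x := row.getD j 0
  (st.1.set j (st.1.getD j 0 + x),
   if PySem.Int.mod x p ≠ 0 then st.2.set j false else st.2)

def sum_elements_columns_multiples_alt (matrix : List (List Int)) (p : Int) : Int :=
  let n := matrix.headI.length
  let st := matrix.foldl (fun st row => (List.range n).foldl (pvB_upd p row) st)
              (List.replicate n 0, List.replicate n true)
  (st.1.zip st.2).foldl (fun acc sg => if sg.2 then acc + sg.1 else acc) 0

-- ===== PRECONDITION & SPEC =====
-- Pre_ excludes: the empty matrix (both raise IndexError at matrix[0]); matrices with a row
-- shorter than the first row, on which B raises IndexError and A raises on many (where A's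
-- early break happens to let A return, that returning set is not closed-form); and p = 0 with
-- a nonempty first row (both raise ZeroDivisionError). Rows longer than the first are admitted:
-- both programs only read the first len(matrix[0]) entries of each row.
def Pre_sum_elements_columns_multiples (matrix : List (List Int)) (p : Int) : Prop :=
  matrix ≠ [] ∧ (∀ row ∈ matrix, matrix.headI.length ≤ row.length) ∧
    (matrix.headI.length = 0 ∨ p ≠ 0)
instance (matrix : List (List Int)) (p : Int) : Decidable (Pre_sum_elements_columns_multiples matrix p) := by
  unfold Pre_sum_elements_columns_multiples; infer_instance
def pvWitness_sum_elements_columns_multiples : List (List Int) × Int := ([[2, 4], [3, 6]], 2)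

def Spec_sum_elements_columns_multiples (matrix : List (List Int)) (p : Int) (out : Int) : Prop := out = sum_elements_columns_multiples_alt matrix p
instance (matrix : List (List Int)) (p : Int) (out : Int) : Decidable (Spec_sum_elements_columns_multiples matrix p out) := by unfold Spec_sum_elements_columns_multiples; infer_instance

-- ===== CLAIM (what is proved, stated in full; the proofs are below) =====
def Claim_equal_sum_elements_columns_multiples : Prop := ∀ (matrix : List (List Int)) (p : Int), Dom_sum_elements_columns_multiples matrix p → Pre_sum_elements_columns_multiples matrix p → Spec_sum_elements_columns_multiples matrix p (sum_elements_columns_multiples matrix p)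

-- ===== LEMMAS AND PROOFS =====

-- A's inner loop-with-break is List.all over the index list
theorem pvA_colCheck_eq_all (matrix : List (List Int)) (p : Int) (j : Nat) (l : List Nat) :
    pvA_colCheck matrix p j l = l.all (fun i => PySem.Int.mod ((matrix.getD i []).getD j 0) p == 0) := by
  induction l with
  | nil => rfl
  | cons i rest ih =>
      simp only [pvA_colCheck, List.all_cons, ih]
      by_cases h : PySem.Int.mod ((matrix.getD i []).getD j 0) p = 0
      · rw [h]; simp
      · rw [if_pos h, (beq_eq_false_iff_ne (a := PySem.Int.mod ((matrix.getD i []).getD j 0) p) (b := 0)).mpr h]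
        simp

-- reading a list back by index
theorem pv_map_range_getD {α : Type} (l : List α) (d : α) :
    (List.range l.length).map (fun i => l.getD i d) = l := by
  induction l with
  | nil => rfl
  | cons a t ih =>
      simp only [List.length_cons, List.range_succ_eq_map, List.map_cons, List.map_map]
      exact congrArg (a :: ·) ih

-- set on a map over range
theorem pv_set_map_range {α : Type} (n m : Nat) (hm : m < n) (h : Nat → α) (v : α) :
    ((List.range n).map h).set m v = (List.range n).map (fun j => if j = m then v else h j) := by
  apply List.ext_getElem
  · simp
  · intro i h1 h2
    simp only [List.getElem_set, List.getElem_map, List.getElem_range]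
    rcases eq_or_ne i m with he | he
    · simp [he]
    · rw [if_neg (fun h => he h.symm), if_neg he]

theorem pv_getD_map_range {α : Type} (n m : Nat) (hm : m < n) (h : Nat → α) (d : α) :
    ((List.range n).map h).getD m d = h m := by
  rw [List.getD_eq_getElem?_getD]
  simp [List.getElem?_map, List.getElem?_range, hm]

-- B's inner loop over the first m column indices, on state given as maps over range n
theorem pvB_inner (p : Int) (row : List Int) (n m : Nat) (hm : m ≤ n)
    (f : Nat → Int) (g : Nat → Bool) :
    (List.range m).foldl (pvB_upd p row) ((List.range n).map f, (List.range n).map g)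
      = ((List.range n).map (fun j => if j < m then f j + row.getD j 0 else f j),
         (List.range n).map (fun j => if j < m then g j && (PySem.Int.mod (row.getD j 0) p == 0) else g j)) := by
  induction m with
  | zero => simp
  | succ m ih =>
      have hm' : m ≤ n := Nat.le_of_succ_le hm
      have hmn : m < n := Nat.lt_of_succ_le hm
      rw [List.range_succ, List.foldl_append, ih hm']
      simp only [List.foldl_cons, List.foldl_nil, pvB_upd]
      simp only [Prod.mk.injEq]
      constructor
      · rw [pv_getD_map_range n m hmn, pv_set_map_range n m hmn]
        apply List.map_congr_left
        intro j _
        by_cases hj : j = m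
        · subst hj; simp [Nat.lt_irrefl, Nat.lt_succ_self]
        · rcases Nat.lt_or_ge j m with h | h
          · simp [hj, h, Nat.lt_succ_of_lt h]
          · have : ¬ j < m := Nat.not_lt.mpr h
            have h2 : ¬ j < m + 1 := by omega
            simp [hj, this, h2]
      · by_cases hd : PySem.Int.mod (row.getD m 0) p ≠ 0
        · rw [if_pos hd, pv_set_map_range n m hmn]
          apply List.map_congr_left
          intro j _
          by_cases hj : j = m
          · subst hj
            have : (PySem.Int.mod (row.getD j 0) p == 0) = false := by
              exact beq_eq_false_iff_ne.mpr hd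
            simp [Nat.lt_irrefl, Nat.lt_succ_self, this]
            exact fun _ => hd
          · rcases Nat.lt_or_ge j m with h | h
            · simp [hj, h, Nat.lt_succ_of_lt h]
            · have h1 : ¬ j < m := Nat.not_lt.mpr h
              have h2 : ¬ j < m + 1 := by omega
              simp [hj, h1, h2]
        · rw [if_neg hd]
          apply List.map_congr_left
          intro j _
          by_cases hj : j = m
          · subst hj
            have hd0 : PySem.Int.mod (row.getD j 0) p = 0 := by
              by_contra hc; exact hd hc
            have : (PySem.Int.mod (row.getD j 0) p == 0) = true := beq_iff_eq.mpr hd0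
            simp [Nat.lt_irrefl, Nat.lt_succ_self, this]
            exact fun _ => hd0
          · rcases Nat.lt_or_ge j m with h | h
            · simp [h, Nat.lt_succ_of_lt h]
            · have h1 : ¬ j < m := Nat.not_lt.mpr h
              have h2 : ¬ j < m + 1 := by omega
              simp [h1, h2]

-- B's outer loop over the rows: running sums and flags per column
theorem pvB_outer (p : Int) (n : Nat) (rows : List (List Int)) (f : Nat → Int) (g : Nat → Bool) :
    rows.foldl (fun st row => (List.range n).foldl (pvB_upd p row) st)
        ((List.range n).map f, (List.range n).map g)
      = ((List.range n).map (fun j => f j + (rows.map (fun r => r.getD j 0)).sum),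
         (List.range n).map (fun j => g j && (rows.map (fun r => r.getD j 0)).all (fun x => PySem.Int.mod x p == 0))) := by
  induction rows generalizing f g with
  | nil => simp
  | cons row rest ih =>
      simp only [List.foldl_cons]
      have hin := pvB_inner p row n n (le_refl n) f g
      have h1 : ((List.range n).map (fun j => if j < n then f j + row.getD j 0 else f j))
          = (List.range n).map (fun j => f j + row.getD j 0) := by
        apply List.map_congr_left; intro j hj
        simp [List.mem_range.mp hj]
      have h2 : ((List.range n).map (fun j => if j < n then g j && (PySem.Int.mod (row.getD j 0) p == 0) else g j))
          = (List.range n).map (fun j => g j && (PySem.Int.mod (row.getD j 0) p == 0)) := by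
        apply List.map_congr_left; intro j hj
        simp [List.mem_range.mp hj]
      rw [hin, h1, h2, ih]
      simp only [Prod.mk.injEq]
      constructor
      · apply List.map_congr_left; intro j _
        simp [List.map_cons, List.sum_cons]; ring
      · apply List.map_congr_left; intro j _
        simp [List.map_cons, List.all_cons, Bool.and_assoc]

-- fold of 'if flag then add' over pairs as a sum of ites
theorem pv_foldl_pair_add (l : List (Int × Bool)) (a : Int) :
    l.foldl (fun acc sg => if sg.2 then acc + sg.1 else acc) a
      = a + (l.map (fun sg => if sg.2 then sg.1 else 0)).sum := by
  induction l generalizing a with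
  | nil => simp
  | cons c t ih =>
      simp only [List.foldl_cons, List.map_cons, List.sum_cons, ih]
      by_cases h : c.2 <;> simp [h] <;> ring

-- sum over a filter as a sum of ites
theorem pv_sum_filter_ite (c : Nat → Bool) (f : Nat → Int) (l : List Nat) :
    ((l.filter c).map f).sum = (l.map (fun j => if c j then f j else 0)).sum := by
  induction l with
  | nil => rfl
  | cons x t ih =>
      by_cases h : c x <;> simp [List.filter_cons, h, ih]

-- ===== VERDICT (by name: the statement is the Claim_ definition above) =====
theorem sum_elements_columns_multiples_spec : Claim_equal_sum_elements_columns_multiples := by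
  intro matrix p _ hpre
  clear hpre
  unfold Spec_sum_elements_columns_multiples
  unfold sum_elements_columns_multiples sum_elements_columns_multiples_alt
  dsimp only
  set w := matrix.headI.length with hw
  -- B side: evaluate the streaming pass
  have hrepl0 : (List.replicate w (0 : Int)) = (List.range w).map (fun _ => (0 : Int)) := by
    rw [List.map_const', List.length_range]
  have hreplT : (List.replicate w (true : Bool)) = (List.range w).map (fun _ => (true : Bool)) := by
    rw [List.map_const', List.length_range]
  rw [hrepl0, hreplT, pvB_outer p w matrix (fun _ => 0) (fun _ => true)]
  simp only [zero_add, Bool.true_and]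
  rw [List.zip_map', pv_foldl_pair_add, List.map_map]
  -- A side: phase 1 as a filter
  have hfilt := PySem.List.foldl_append_if
      (fun j => pvA_colCheck matrix p j (List.range matrix.length)) (id : Nat → Nat)
      (List.range w) []
  simp only [id_eq] at hfilt
  rw [hfilt]
  simp only [List.nil_append, List.map_id]
  -- A side: phase 2 as a sum of column sums over the filtered index list
  have hA2 : ∀ (arr : List Nat) (a : Int),
      arr.foldl (fun s j => (List.range matrix.length).foldl
          (fun s' i => s' + (matrix.getD i []).getD j 0) s) a
        = a + (arr.map (fun j => ((List.range matrix.length).map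
            (fun i => (matrix.getD i []).getD j 0)).sum)).sum := by
    intro arr a
    induction arr generalizing a with
    | nil => simp
    | cons x t ih =>
        simp only [List.foldl_cons, List.map_cons, List.sum_cons, ih]
        ring_nf
        rw [PySem.List.foldl_add]
        ring
  rw [hA2, zero_add]
  -- identify per-column check and sum
  have hcol : ∀ j : Nat, (List.range matrix.length).map (fun i => (matrix.getD i []).getD j 0)
      = matrix.map (fun r => r.getD j 0) := by
    intro j
    have := pv_map_range_getD matrix ([] : List Int)
    calc (List.range matrix.length).map (fun i => (matrix.getD i []).getD j 0)
        = ((List.range matrix.length).map (fun i => matrix.getD i [])).map (fun r => r.getD j 0) := by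
          rw [List.map_map]; rfl
      _ = matrix.map (fun r => r.getD j 0) := by rw [this]
  rw [pv_sum_filter_ite, zero_add]
  apply congrArg
  apply List.map_congr_left
  intro j _
  have hcheck : pvA_colCheck matrix p j (List.range matrix.length)
      = (matrix.map (fun r => r.getD j 0)).all (fun x => PySem.Int.mod x p == 0) := by
    rw [pvA_colCheck_eq_all, List.all_map]
    have : (List.range matrix.length).all (fun i => PySem.Int.mod ((matrix.getD i []).getD j 0) p == 0)
        = ((List.range matrix.length).map (fun i => matrix.getD i [])).all
            (fun r => PySem.Int.mod (r.getD j 0) p == 0) := by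
      rw [List.all_map]; rfl
    rw [this, pv_map_range_getD matrix ([] : List Int)]
    rfl
  rw [Function.comp, hcheck, hcol j]
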